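-- pv_equiv track=rewrite | github.com/frohman04/advent-2017 | 06-2/main_062.py | single_rebalance
-- ===== SOURCE A (Python) =====
-- from typing import List
--
-- def single_rebalance(cells: List[int]) -> List[int]:
--     idx = -max(zip(cells, [-x for x in range(len(cells))]))[1]
--
--     remaining = cells[idx]
--     cells[idx] = 0
--     while remaining > 0:
--         idx += 1
--         if idx == len(cells):
--             idx = 0
--         cells[idx] += 1
--         remaining -= 1
--
--     return cells
-- ===== SOURCE B (Python) =====
-- def single_rebalance(cells):
--     n = len(cells)
--     best, idx = cells[0], 0
--     for i, x in enumerate(cells):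
--         if x > best:
--             best, idx = x, i
--     cells[idx] = 0
--     if best > 0:
--         q, r = divmod(best, n)
--         for k in range(n):
--             cells[(idx + 1 + k) % n] += q + (1 if k < r else 0)
--     return cells
-- ===== Notes on version B (the rewrite author's own statement) =====
-- stated objective: faster
-- what changed: Instead of handing out the largest cell's blocks one at a time in a while loop (O(max value) iterations), B computes the distribution in closed form with divmod: every cell gets base = v//n and the first v%n cells after the maximum get one extra, in a single O(n) pass; the argmax is found by a plain enumerate scan instead of A's max-over-zip-with-negated-indices trick.
import Mathlib
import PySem

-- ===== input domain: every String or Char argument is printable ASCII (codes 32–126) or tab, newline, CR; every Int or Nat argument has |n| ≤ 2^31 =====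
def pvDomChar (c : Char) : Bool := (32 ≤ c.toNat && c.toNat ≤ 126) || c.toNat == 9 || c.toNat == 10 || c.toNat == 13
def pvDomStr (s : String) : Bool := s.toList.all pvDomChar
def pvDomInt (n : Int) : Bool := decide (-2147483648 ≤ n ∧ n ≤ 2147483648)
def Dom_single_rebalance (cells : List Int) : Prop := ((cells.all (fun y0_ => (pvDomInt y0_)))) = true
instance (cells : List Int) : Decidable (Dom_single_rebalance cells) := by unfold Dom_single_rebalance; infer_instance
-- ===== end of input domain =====

-- B replaces A's one-block-at-a-time while loop (one iteration per block of the largest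
-- cell) by a closed-form divmod distribution in one pass over the array (return-value
-- equivalence; both Pythons also mutate their argument in place, B included).

-- ===== PORT A =====
-- while remaining > 0: idx += 1; wrap; cells[idx] += 1; remaining -= 1
-- (fuel = remaining.toNat: the loop runs exactly that many times; idx2 is always a
-- valid non-negative index there, so the total pyGetD/pySetD forms are exact)
def whileA (cells : List Int) (idx : Int) : Nat → List Int
  | 0 => cells
  | f + 1 =>
    let idx1 := idx + 1
    let idx2 := if idx1 = (cells.length : Int) then 0 else idx1
    whileA (PySem.List.pySetD cells idx2 (PySem.List.pyGetD cells idx2 0 + 1)) idx2 f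

def single_rebalance (cells : List Int) : List Int :=
  -- idx = -max(zip(cells, [-x for x in range(len(cells))]))[1]
  match PySem.List.max2?
      (List.zip cells ((PySem.List.pyRange 0 cells.length 1).map (fun x => -x)))
      (fun p => p.1) (fun p => p.2) with
  | none => []  -- max() of an empty sequence: ValueError (excluded by Pre_)
  | some p =>
    let idx := -p.2
    let remaining := PySem.List.pyGetD cells idx 0   -- idx always in range here
    let cells1 := PySem.List.pySetD cells idx 0
    whileA cells1 idx remaining.toNat

-- ===== PORT B =====
def single_rebalance_alt (cells : List Int) : List Int :=
  match cells with
  | [] => []  -- cells[0]: IndexError (excluded by Pre_)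
  | c0 :: _ =>
    let n := cells.length
    let bi := (PySem.List.enumerate cells 0).foldl
        (fun acc p => if acc.1 < p.2 then (p.2, p.1) else acc) (c0, 0)
    let best := bi.1
    let idx := bi.2
    let cells1 := PySem.List.pySetD cells idx 0
    if 0 < best then
      let q := PySem.Int.floordiv best (n : Int)
      let r := PySem.Int.mod best (n : Int)
      (PySem.List.pyRange 0 (n : Int) 1).foldl (fun cs k =>
        let j := PySem.Int.mod (idx + 1 + k) (n : Int)
        PySem.List.pySetD cs j
          (PySem.List.pyGetD cs j 0 + (q + if k < r then 1 else 0))) cells1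
    else cells1

-- ===== PRECONDITION & SPEC =====
-- Pre_ excludes only the empty list, on which Python A raises ValueError (max() of
-- an empty sequence); B raises IndexError there.
def Pre_single_rebalance (cells : List Int) : Prop := cells ≠ []
instance (cells : List Int) : Decidable (Pre_single_rebalance cells) := by
  unfold Pre_single_rebalance; infer_instance

def pvWitness_single_rebalance : List Int := [0, 2, 7, 0]

def Spec_single_rebalance (cells : List Int) (out : List Int) : Prop := out = single_rebalance_alt cells
instance (cells : List Int) (out : List Int) : Decidable (Spec_single_rebalance cells out) := by unfold Spec_single_rebalance; infer_instance

-- ===== CLAIM (what is proved, stated in full; the proofs are below) =====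
def Claim_equal_single_rebalance : Prop := ∀ (cells : List Int), Dom_single_rebalance cells → Pre_single_rebalance cells → Spec_single_rebalance cells (single_rebalance cells)

-- ===== LEMMAS AND PROOFS =====

def bump (cs : List Int) (j : Nat) : List Int := cs.set j (cs.getD j 0 + 1)
def spin (cs : List Int) (s : Nat) : Nat → List Int
  | 0 => cs
  | f + 1 => spin (bump cs ((s + 1) % cs.length)) ((s + 1) % cs.length) f

lemma length_bump (cs : List Int) (j : Nat) : (bump cs j).length = cs.length := by simp [bump]

lemma length_spin : ∀ (f : Nat) (cs : List Int) (s : Nat), (spin cs s f).length = cs.length := by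
  intro f
  induction f with
  | zero => intro cs s; rfl
  | succ f ih => intro cs s; rw [spin, ih, length_bump]

lemma bump_getD (cs : List Int) (i j : Nat) (_ : i < cs.length) (hj : j < cs.length) :
    (bump cs i).getD j 0 = if i = j then cs.getD j 0 + 1 else cs.getD j 0 := by
  unfold bump
  rw [List.getD_eq_getElem _ _ (by rw [List.length_set]; exact hj), List.getElem_set]
  split
  · next h => rw [h, List.getD_eq_getElem _ _ hj]
  · rw [List.getD_eq_getElem _ _ hj]

lemma spin_getD : ∀ (k : Nat) (cs : List Int) (s j : Nat), k ≤ cs.length → s < cs.length → j < cs.length →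
    (spin cs s k).getD j 0 =
      cs.getD j 0 + (if (s < j ∧ j ≤ s + k) ∨ j + cs.length ≤ s + k then 1 else 0) := by
  intro k
  induction k with
  | zero =>
    intro cs s j _ hs hj
    rw [spin]
    have h : ¬ ((s < j ∧ j ≤ s + 0) ∨ j + cs.length ≤ s + 0) := by omega
    rw [if_neg h, add_zero]
  | succ k ih =>
    intro cs s j hk hs hj
    have hn : 0 < cs.length := by omega
    have hcase : (s + 1) % cs.length = 0 ∧ s + 1 = cs.length ∨
        (s + 1) % cs.length = s + 1 ∧ s + 1 < cs.length := by
      rcases Nat.lt_or_ge (s + 1) cs.length with h | h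
      · right; exact ⟨Nat.mod_eq_of_lt h, h⟩
      · left; have : s + 1 = cs.length := by omega
        exact ⟨by rw [this, Nat.mod_self], this⟩
    rw [spin]
    rcases hcase with ⟨h0, he⟩ | ⟨h0, he⟩ <;>
    · rw [h0]
      rw [ih _ _ _ (by rw [length_bump]; omega) (by rw [length_bump]; omega)
            (by rw [length_bump]; exact hj),
          length_bump, bump_getD cs _ j (by omega) hj]
      split_ifs <;> omega

lemma spin_split : ∀ (a : Nat) (b : Nat) (cs : List Int) (s : Nat), s < cs.length →
    spin cs s (a + b) = spin (spin cs s a) ((s + a) % cs.length) b := by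
  intro a
  induction a with
  | zero =>
    intro b cs s hs
    rw [spin, Nat.zero_add, Nat.add_zero, Nat.mod_eq_of_lt hs]
  | succ a ih =>
    intro b cs s hs
    have hn : 0 < cs.length := by omega
    have h1 : a + 1 + b = (a + b) + 1 := by omega
    rw [h1, spin, spin]
    rw [ih b _ _ (by rw [length_bump]; exact Nat.mod_lt _ hn)]
    congr 1
    rw [length_bump, Nat.mod_add_mod]
    congr 1
    omega

lemma spin_full (cs : List Int) (s : Nat) (hs : s < cs.length) :
    spin cs s cs.length = cs.map (· + 1) := by
  apply List.ext_getElem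
  · rw [length_spin]; simp
  · intro j hj1 hj2
    have hj : j < cs.length := by rw [length_spin] at hj1; exact hj1
    have h := spin_getD cs.length cs s j le_rfl hs hj
    rw [List.getD_eq_getElem _ _ hj1, List.getD_eq_getElem _ _ hj] at h
    have hcond : (s < j ∧ j ≤ s + cs.length) ∨ j + cs.length ≤ s + cs.length := by omega
    rw [if_pos hcond] at h
    rw [h, List.getElem_map]

def target (cs : List Int) (s r : Nat) (q : Int) : List Int :=
  cs.mapIdx (fun j x =>
    x + q + (if (s < j ∧ j ≤ s + r) ∨ j + cs.length ≤ s + r then 1 else 0))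

lemma spin_eq_target : ∀ (q : Nat) (cs : List Int) (s r : Nat), s < cs.length → r < cs.length →
    spin cs s (q * cs.length + r) = target cs s r (q : Int) := by
  intro q
  induction q with
  | zero =>
    intro cs s r hs hr
    apply List.ext_getElem
    · rw [length_spin]; simp [target]
    · intro j hj1 hj2
      have hj : j < cs.length := by rw [length_spin] at hj1; exact hj1
      have h := spin_getD (0 * cs.length + r) cs s j (by omega) hs hj
      rw [List.getD_eq_getElem _ _ hj1, List.getD_eq_getElem _ _ hj] at h
      rw [h]
      simp only [target, List.getElem_mapIdx]
      have : (0 : Nat) * cs.length + r = r := by omega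
      rw [this]
      norm_num
  | succ q ih =>
    intro cs s r hs hr
    have hn : 0 < cs.length := by omega
    have h1 : (q + 1) * cs.length + r = cs.length + (q * cs.length + r) := by ring
    rw [h1, spin_split _ _ _ _ hs, spin_full _ _ hs]
    have hsl : (s + cs.length) % cs.length = s := by
      rw [Nat.add_mod_right, Nat.mod_eq_of_lt hs]
    rw [hsl]
    have hlen : (cs.map (· + 1)).length = cs.length := by simp
    have h2 := ih (cs.map (· + 1)) s r (by rw [hlen]; exact hs) (by rw [hlen]; exact hr)
    rw [hlen] at h2
    rw [h2]
    apply List.ext_getElem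
    · simp [target]
    · intro j hj1 hj2
      simp only [target, List.getElem_mapIdx, List.getElem_map, hlen]
      push_cast
      split_ifs <;> ring

lemma whileA_eq_spin : ∀ (f : Nat) (cs : List Int) (idx : Int), 0 ≤ idx → idx < cs.length →
    whileA cs idx f = spin cs idx.toNat f := by
  intro f
  induction f with
  | zero => intro cs idx _ _; rfl
  | succ f ih =>
    intro cs idx h0 h1
    have hn : 0 < cs.length := by omega
    rw [whileA, spin]
    have hi2 : (if idx + 1 = (cs.length : Int) then 0 else idx + 1) = (((idx.toNat + 1) % cs.length : Nat) : Int) := by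
      split
      · next h =>
        have : idx.toNat + 1 = cs.length := by omega
        rw [this, Nat.mod_self]; rfl
      · next h =>
        have : idx.toNat + 1 < cs.length := by omega
        rw [Nat.mod_eq_of_lt this]; push_cast; omega
    rw [hi2]
    have hlt : (idx.toNat + 1) % cs.length < cs.length := Nat.mod_lt _ hn
    have hset : PySem.List.pySetD cs (((idx.toNat + 1) % cs.length : Nat) : Int)
        (PySem.List.pyGetD cs (((idx.toNat + 1) % cs.length : Nat) : Int) 0 + 1) =
        bump cs ((idx.toNat + 1) % cs.length) := by
      rw [PySem.List.pySetD_of_nonneg _ _ (by positivity),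
          PySem.List.pyGetD_eq_getElem _ _ (by positivity) (by exact_mod_cast hlt)]
      unfold bump
      simp only [Int.toNat_natCast]
      rw [List.getD_eq_getElem _ _ hlt]
    rw [hset, ih _ _ (by positivity) (by rw [bump, List.length_set]; exact_mod_cast hlt),
        Int.toNat_natCast]

def hitk (n s j : Nat) : Nat := if s < j then j - s - 1 else j + n - s - 1

lemma foldB_length : ∀ (ks : List Int) (cs : List Int) (n : Nat) (s q rr : Int),
    ((ks.foldl (fun cs k =>
        PySem.List.pySetD cs (PySem.Int.mod (s + 1 + k) (n : Int))
          (PySem.List.pyGetD cs (PySem.Int.mod (s + 1 + k) (n : Int)) 0 +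
            (q + if k < rr then 1 else 0))) cs)).length = cs.length := by
  intro ks
  induction ks with
  | nil => intro cs n s q rr; rfl
  | cons k ks ih =>
    intro cs n s q rr
    rw [List.foldl_cons, ih, PySem.List.length_pySetD]

lemma int_mod_window (x n : Int) (h0 : 0 ≤ x) (h1 : x < 2 * n) (hn : 0 < n) :
    PySem.Int.mod x n = if x < n then x else x - n := by
  rw [PySem.Int.mod_eq_emod_of_pos hn]
  split
  · next h => exact Int.emod_eq_of_lt h0 h
  · next h =>
    rw [← Int.sub_emod_right x n]
    exact Int.emod_eq_of_lt (by omega) (by omega)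

lemma foldB_getD : ∀ (u : Nat) (cs : List Int) (n s : Nat) (q rr : Int), cs.length = n →
    u ≤ n → s < n → ∀ j : Nat, j < n →
    ((PySem.List.pyRange 0 (u : Int) 1).foldl (fun cs k =>
        PySem.List.pySetD cs (PySem.Int.mod (((s : Int)) + 1 + k) (n : Int))
          (PySem.List.pyGetD cs (PySem.Int.mod (((s : Int)) + 1 + k) (n : Int)) 0 +
            (q + if k < rr then 1 else 0))) cs).getD j 0
      = cs.getD j 0 +
        (if hitk n s j < u then q + (if (hitk n s j : Int) < rr then 1 else 0) else 0) := by
  intro u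
  induction u with
  | zero =>
    intro cs n s q rr hlen hu hs j hj
    rw [show ((0 : Nat) : Int) = 0 by rfl, PySem.List.pyRange_one_eq_nil le_rfl]
    simp
  | succ u ih =>
    intro cs n s q rr hlen hu hs j hj
    have hn : 0 < n := by omega
    have hcast : (((u + 1 : Nat)) : Int) = ((u : Nat) : Int) + 1 := by push_cast; ring
    rw [hcast, PySem.List.pyRange_one_succ_right (by positivity), List.foldl_append,
        List.foldl_cons, List.foldl_nil]
    -- the result of the first u steps
    set res := ((PySem.List.pyRange 0 (u : Int) 1).foldl (fun cs k =>
        PySem.List.pySetD cs (PySem.Int.mod (((s : Int)) + 1 + k) (n : Int))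
          (PySem.List.pyGetD cs (PySem.Int.mod (((s : Int)) + 1 + k) (n : Int)) 0 +
            (q + if k < rr then 1 else 0))) cs) with hres
    have hreslen : res.length = n := by rw [hres, foldB_length, hlen]
    -- the position written in step u, as a Nat
    have hju : PySem.Int.mod (((s : Int)) + 1 + (u : Int)) (n : Int) =
        ((if s + 1 + u < n then s + 1 + u else s + 1 + u - n : Nat) : Int) := by
      rw [int_mod_window _ _ (by positivity) (by omega) (by exact_mod_cast hn)]
      split <;> (push_cast; omega)
    set ju : Nat := if s + 1 + u < n then s + 1 + u else s + 1 + u - n with hjudef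
    have hjun : ju < n := by rw [hjudef]; split <;> omega
    rw [hju]
    rw [PySem.List.pySetD_of_nonneg _ _ (by positivity),
        PySem.List.pyGetD_eq_getElem _ _ (by positivity) (by rw [hreslen]; exact_mod_cast hjun)]
    simp only [Int.toNat_natCast]
    rw [List.getD_eq_getElem _ _ (by rw [List.length_set, hreslen]; exact hj),
        List.getElem_set]
    have hget_res : ∀ (j' : Nat) (hj' : j' < n), res[j']'(by rw [hreslen]; exact hj') =
        cs.getD j' 0 + (if hitk n s j' < u then q + (if (hitk n s j' : Int) < rr then 1 else 0) else 0) := by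
      intro j' hj'
      have h := ih cs n s q rr hlen (by omega) hs j' hj'
      rw [← hres] at h
      rw [← List.getD_eq_getElem res 0 (by rw [hreslen]; exact hj'), h]
    have hkey : ju = j ↔ hitk n s j = u := by
      unfold hitk
      rw [hjudef]
      split_ifs <;> omega
    split
    · next heq =>
      -- j is the cell written in step u
      have hku : hitk n s j = u := hkey.mp heq
      rw [hget_res ju hjun, heq, hku]
      have t1 : ¬ (u < u) := by omega
      have t2 : u < u + 1 := by omega
      rw [if_neg t1, if_pos t2]
      ring
    · next hne =>
      have hku : hitk n s j ≠ u := fun h => hne (hkey.mpr h)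
      rw [hget_res j hj]
      have h1 : hitk n s j < u + 1 ↔ hitk n s j < u := by omega
      simp only [h1]

lemma foldB_eq_target (cs : List Int) (n s : Nat) (q r : Nat) (hn : cs.length = n)
    (hs : s < n) (hr : r < n) :
    ((PySem.List.pyRange 0 (n : Int) 1).foldl (fun cs k =>
        PySem.List.pySetD cs (PySem.Int.mod (((s : Int)) + 1 + k) (n : Int))
          (PySem.List.pyGetD cs (PySem.Int.mod (((s : Int)) + 1 + k) (n : Int)) 0 +
            ((q : Int) + if k < (r : Int) then 1 else 0))) cs)
      = target cs s r (q : Int) := by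
  apply List.ext_getElem
  · rw [foldB_length]; simp [target]
  · intro j hj1 hj2
    have hj : j < n := by rw [foldB_length, hn] at hj1; exact hj1
    have h := foldB_getD n cs n s (q : Int) (r : Int) hn le_rfl hs j hj
    rw [List.getD_eq_getElem _ _ hj1, List.getD_eq_getElem _ _ (by rw [hn]; exact hj)] at h
    rw [h]
    simp only [target, List.getElem_mapIdx, hn]
    have hhit : hitk n s j < n := by unfold hitk; split <;> omega
    rw [if_pos hhit]
    have hiff : ((hitk n s j : Int) < (r : Int)) ↔ ((s < j ∧ j ≤ s + r) ∨ j + n ≤ s + r) := by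
      unfold hitk
      split_ifs with h1
      · constructor
        · intro h2; left; constructor
          · exact h1
          · omega
        · intro h2
          rcases h2 with ⟨_, h3⟩ | h3 <;> [skip; omega]
          have : j - s - 1 < r := by omega
          exact_mod_cast this
      · constructor
        · intro h2; right
          have : (j + n - s - 1 : Nat) < r := by exact_mod_cast h2
          omega
        · intro h2
          rcases h2 with ⟨h3, _⟩ | h3
          · omega
          · have : (j + n - s - 1 : Nat) < r := by omega
            exact_mod_cast this
    split_ifs with ha hb hb
    · ring
    · exact absurd (hiff.mp ha) hb
    · exact absurd (hiff.mpr hb) ha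
    · ring

lemma lockstep : ∀ (rest : List Int) (i0 : Nat) (av ai : Int), 0 ≤ ai → ai < (i0 : Int) →
    List.foldl (fun acc x =>
        match acc with
        | none => some x
        | some m => if (decide (m.1 < x.1) || !decide (x.1 < m.1) && decide (m.2 < x.2)) = true
            then some x else some m)
      (some ((av, -ai) : Int × Int))
      (List.zip rest ((List.range rest.length).map (fun (t : Nat) => -((i0 : Int) + (t : Int))))) =
    some ((List.foldl (fun acc p => if acc.1 < p.2 then (p.2, p.1) else acc) ((av, ai) : Int × Int)
            (PySem.List.enumerate rest (i0 : Int))).1,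
          -(List.foldl (fun acc p => if acc.1 < p.2 then (p.2, p.1) else acc) ((av, ai) : Int × Int)
            (PySem.List.enumerate rest (i0 : Int))).2) := by
  intro rest
  induction rest with
  | nil => intro i0 av ai h0 h1; simp
  | cons x rest ih =>
    intro i0 av ai h0 h1
    rw [List.length_cons, List.range_succ_eq_map, List.map_cons, List.zip_cons_cons,
        PySem.List.enumerate_cons, List.foldl_cons, List.foldl_cons]
    have hmap : (List.map Nat.succ (List.range rest.length)).map (fun (t : Nat) => -((i0 : Int) + (t : Int))) =
        (List.range rest.length).map (fun (t : Nat) => -(((i0 + 1 : Nat) : Int) + (t : Int))) := by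
      rw [List.map_map]
      apply List.map_congr_left
      intro t _
      simp only [Function.comp]
      push_cast
      ring
    rw [hmap]
    dsimp only
    have hlt : ¬ ((-ai : Int) < -(((i0 : Int)) + ((0 : Nat) : Int))) := by push_cast; omega
    have hreduce : (if (decide (av < x) || !decide (x < av) && decide (-ai < -(((i0 : Int)) + ((0 : Nat) : Int)))) = true
        then some ((x, -(((i0 : Int)) + ((0 : Nat) : Int))) : Int × Int) else some ((av, -ai) : Int × Int)) =
        if av < x then some ((x, -(((i0 : Int)) + ((0 : Nat) : Int))) : Int × Int) else some ((av, -ai) : Int × Int) := by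
      by_cases hx : av < x
      · rw [if_pos hx, if_pos]; simp [hx]
      · rw [if_neg hx, if_neg]
        simp only [Bool.or_eq_true, Bool.and_eq_true, decide_eq_true_eq, Bool.not_eq_true',
          decide_eq_false_iff_not, not_or, not_and]
        exact ⟨hx, fun _ => hlt⟩
    rw [hreduce]
    by_cases hx : av < x
    · rw [if_pos hx, if_pos hx]
      have H := ih (i0 + 1) x (i0 : Int) (by positivity) (by push_cast; omega)
      push_cast at H ⊢
      convert H using 3
    · rw [if_neg hx, if_neg hx]
      have H := ih (i0 + 1) av ai h0 (by push_cast; omega)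
      push_cast at H ⊢
      convert H using 3

lemma foldB2_props : ∀ (rest : List Int) (i0 : Int) (acc : Int × Int),
    List.foldl (fun acc p => if acc.1 < p.2 then (p.2, p.1) else acc) acc
        (PySem.List.enumerate rest i0) = acc ∨
      ∃ p ∈ PySem.List.enumerate rest i0,
        List.foldl (fun acc p => if acc.1 < p.2 then (p.2, p.1) else acc) acc
          (PySem.List.enumerate rest i0) = (p.2, p.1) := by
  intro rest
  induction rest with
  | nil => intro i0 acc; left; rfl
  | cons x rest ih =>
    intro i0 acc
    rw [PySem.List.enumerate_cons, List.foldl_cons]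
    dsimp only
    rcases ih (i0 + 1) (if acc.1 < x then ((x, i0) : Int × Int) else acc) with h | ⟨p, hp, h⟩
    · by_cases hx : acc.1 < x
      · right
        exact ⟨(i0, x), List.mem_cons_self, by rw [h, if_pos hx]⟩
      · left
        rw [h, if_neg hx]
    · right
      exact ⟨p, List.mem_cons_of_mem _ hp, h⟩

lemma mem_enumerate_lookup : ∀ (xs : List Int) (s k x : Int), (k, x) ∈ PySem.List.enumerate xs s →
    ∃ t : Nat, k = s + t ∧ xs[t]? = some x := by
  intro xs
  induction xs with
  | nil => intro s k x h; simp [PySem.List.enumerate] at h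
  | cons y ys ih =>
    intro s k x h
    rw [PySem.List.enumerate_cons, List.mem_cons] at h
    rcases h with h | h
    · refine ⟨0, ?_, ?_⟩
      · have : k = s := (Prod.mk.injEq _ _ _ _).mp h |>.1
        omega
      · have : x = y := (Prod.mk.injEq _ _ _ _).mp h |>.2
        simp [this]
    · obtain ⟨t, ht1, ht2⟩ := ih (s + 1) k x h
      exact ⟨t + 1, by push_cast; omega, by simpa using ht2⟩

lemma argmax_top (c0 : Int) (rest : List Int) :
    PySem.List.max2?
      (List.zip (c0 :: rest) ((PySem.List.pyRange 0 ((c0 :: rest).length : Int) 1).map (fun x => -x)))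
      (fun p => p.1) (fun p => p.2) =
    some ((List.foldl (fun acc p => if acc.1 < p.2 then (p.2, p.1) else acc) ((c0, 0) : Int × Int)
            (PySem.List.enumerate (c0 :: rest) 0)).1,
          -(List.foldl (fun acc p => if acc.1 < p.2 then (p.2, p.1) else acc) ((c0, 0) : Int × Int)
            (PySem.List.enumerate (c0 :: rest) 0)).2) := by
  have h1 : (PySem.List.pyRange 0 ((c0 :: rest).length : Int) 1).map (fun x => -x) =
      (List.range (c0 :: rest).length).map (fun (t : Nat) => -(((0 : Nat) : Int) + (t : Int))) := by
    rw [PySem.List.pyRange_one, List.map_map]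
    apply List.map_congr_left
    intro t _
    simp
  rw [h1, PySem.List.max2?]
  rw [List.length_cons, List.range_succ_eq_map, List.map_cons, List.zip_cons_cons,
      PySem.List.enumerate_cons, List.foldl_cons, List.foldl_cons]
  have hmap : (List.map Nat.succ (List.range rest.length)).map (fun (t : Nat) => -(((0 : Nat) : Int) + (t : Int))) =
      (List.range rest.length).map (fun (t : Nat) => -(((1 : Nat) : Int) + (t : Int))) := by
    rw [List.map_map]
    apply List.map_congr_left
    intro t _
    simp only [Function.comp]
    push_cast
    ring
  rw [hmap]
  dsimp only
  rw [if_neg (lt_irrefl c0)]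
  have H := lockstep rest 1 c0 0 le_rfl (by norm_num)
  push_cast at H ⊢
  convert H using 3
  rename_i acc
  funext y
  cases acc <;> rfl

lemma main_eq (c0 : Int) (rest : List Int) :
    single_rebalance (c0 :: rest) = single_rebalance_alt (c0 :: rest) := by
  unfold single_rebalance single_rebalance_alt
  rw [argmax_top]
  dsimp only
  simp only [neg_neg]
  set F := List.foldl (fun acc p => if acc.1 < p.2 then (p.2, p.1) else acc) ((c0, 0) : Int × Int)
      (PySem.List.enumerate (c0 :: rest) 0) with hF
  -- the scan's result is a genuine (index, value) pair of the list
  have hFprops : 0 ≤ F.2 ∧ F.2 < ((c0 :: rest).length : Int) ∧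
      PySem.List.pyGet? (c0 :: rest) F.2 = some F.1 := by
    rcases foldB2_props (c0 :: rest) 0 (c0, 0) with h | ⟨p, hp, h⟩
    · rw [← hF] at h
      rw [h]
      refine ⟨le_rfl, by simp, ?_⟩
      have h0 : ((0 : Nat) : Int) = ((c0, (0 : Int)).2) := by norm_num
      rw [← h0, PySem.List.pyGet?_natCast]
      rfl
    · obtain ⟨k, x⟩ := p
      obtain ⟨t, ht1, ht2⟩ := mem_enumerate_lookup _ 0 k x hp
      rw [← hF] at h
      rw [h]
      have htlt : t < (c0 :: rest).length := List.getElem?_eq_some_iff.mp ht2 |>.1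
      simp only [List.length_cons] at htlt ⊢
      refine ⟨by omega, by push_cast; omega, ?_⟩
      have hk : (k : Int) = ((t : Nat) : Int) := by omega
      rw [hk, PySem.List.pyGet?_natCast, ht2]
  obtain ⟨hF0, hFlt, hget⟩ := hFprops
  have hrem : PySem.List.pyGetD (c0 :: rest) F.2 0 = F.1 := by
    simp only [PySem.List.pyGetD]
    rw [hget]
    rfl
  rw [hrem]
  set cells1 := PySem.List.pySetD (c0 :: rest) F.2 0 with hc1
  have hlen1 : cells1.length = (c0 :: rest).length := by
    rw [hc1, PySem.List.length_pySetD]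
  by_cases hbest : 0 < F.1
  · rw [if_pos hbest]
    set n := (c0 :: rest).length with hn
    have hnpos : 0 < n := by rw [hn]; simp
    set m := F.1.toNat with hm
    have hmI : (m : Int) = F.1 := Int.toNat_of_nonneg (le_of_lt hbest)
    set sP := F.2.toNat with hsP
    have hsI : (sP : Int) = F.2 := Int.toNat_of_nonneg hF0
    have hslt : sP < n := by omega
    -- A's loop, step by step, is the closed-form distribution
    have hA : whileA cells1 F.2 m = target cells1 sP (m % n) ((m / n : Nat) : Int) := by
      rw [whileA_eq_spin m cells1 F.2 hF0 (by rw [hlen1]; exact hFlt), ← hsP]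
      have hdecomp : m = m / n * n + m % n := (Nat.div_add_mod' m n).symm
      calc spin cells1 sP m
          = spin cells1 sP (m / n * cells1.length + m % n) := by
            rw [hlen1, ← hdecomp]
        _ = target cells1 sP (m % n) ((m / n : Nat) : Int) :=
            spin_eq_target (m / n) cells1 sP (m % n)
              (by rw [hlen1]; exact hslt)
              (by rw [hlen1]; exact Nat.mod_lt _ hnpos)
    rw [hA, ← hsI, ← hmI, PySem.Int.floordiv_natCast, PySem.Int.mod_natCast]
    exact (foldB_eq_target cells1 n sP (m / n) (m % n) (by rw [hlen1])
      hslt (Nat.mod_lt _ hnpos)).symm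
  · rw [if_neg hbest]
    have : F.1.toNat = 0 := by omega
    rw [this]
    rfl

-- ===== VERDICT (by name: the statement is the Claim_ definition above) =====
theorem single_rebalance_spec : Claim_equal_single_rebalance := by
  intro cells _ hpre
  unfold Spec_single_rebalance
  cases cells with
  | nil => exact absurd rfl hpre
  | cons c0 rest => exact main_eq c0 rest
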